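-- pv_equiv track=rewrite | github.com/Matcry12/Video-Maker | src/editor.py | _lab_split_into_blocks
-- ===== SOURCE A (Python) =====
-- def _lab_split_into_blocks(words: list[dict], target: int = 30) -> list[list[dict]]:
--     """Split word list into blocks of ~target words, preferring sentence ends."""
--     blocks: list[list[dict]] = []
--     i = 0
--     while i < len(words):
--         end = min(i + target, len(words))
--         best = end
--         for j in range(end, max(i + target // 2, i + 1), -1):
--             if str(words[j - 1].get("word", "")).strip().endswith((".", "!", "?")):
--                 best = j
--                 break
--         blocks.append(words[i:best])
--         i = best
--     if len(blocks) > 1 and len(blocks[-1]) < 8: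
--         blocks[-2].extend(blocks[-1])
--         blocks.pop()
--     return blocks
-- ===== SOURCE B (Python) =====
-- import bisect
--
--
-- def _lab_split_into_blocks(words: list[dict], target: int = 30) -> list[list[dict]]:
--     """Split word list into blocks of ~target words, preferring sentence ends."""
--     n = len(words)
--     # staged: (1) one pass collecting sentence-end positions, (2) compute the cut
--     # positions, (3) slice once between consecutive cuts.
--     ends = [p for p in range(n)
--             if str(words[p].get("word", "")).strip().endswith((".", "!", "?"))]
--     cuts = [0]
--     while cuts[-1] < n:
--         i = cuts[-1]
--         e = min(i + target, n)
--         lo = max(i + target // 2, i + 1)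
--         k = bisect.bisect_right(ends, e - 1) - 1
--         cuts.append(ends[k] + 1 if k >= 0 and ends[k] >= lo else e)
--     blocks = [words[a:b] for a, b in zip(cuts, cuts[1:])]
--     if len(blocks) > 1 and len(blocks[-1]) < 8:
--         blocks[-2:] = [blocks[-2] + blocks[-1]]
--     return blocks
-- ===== Notes on version B (the rewrite author's own statement) =====
-- stated objective: alternative
-- what changed: B is staged: one pass collects the sorted sentence-end positions, a loop computes only the cut positions via bisect_right (no per-block backwards scan), and the blocks are built afterwards by slicing between consecutive cuts; the small-tail merge is done by slice assignment.
import Mathlib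
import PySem

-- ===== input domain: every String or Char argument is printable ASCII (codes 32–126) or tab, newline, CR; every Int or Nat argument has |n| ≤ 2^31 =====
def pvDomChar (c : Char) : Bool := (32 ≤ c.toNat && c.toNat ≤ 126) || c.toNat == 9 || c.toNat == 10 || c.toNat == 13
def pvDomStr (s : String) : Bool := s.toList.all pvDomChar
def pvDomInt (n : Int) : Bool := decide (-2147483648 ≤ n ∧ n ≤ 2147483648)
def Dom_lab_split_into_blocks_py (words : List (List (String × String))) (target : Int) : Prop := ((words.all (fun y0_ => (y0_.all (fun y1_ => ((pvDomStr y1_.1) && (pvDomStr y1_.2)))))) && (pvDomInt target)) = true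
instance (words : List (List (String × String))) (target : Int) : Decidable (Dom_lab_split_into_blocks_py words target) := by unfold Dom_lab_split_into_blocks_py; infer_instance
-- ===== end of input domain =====

-- B is staged: one pass precomputes the sorted sentence-end positions, a loop computes only
-- the cut positions by bisect, and the blocks are produced by slicing between consecutive
-- cuts; A scans backwards inside each block and accumulates slices (objective: alternative).

-- shared helper: str(w.get("word","")).strip().endswith((".","!","?")) — values are str, so str() is identity
def pvSentEnd (w : List (String × String)) : Bool :=
  let s := PySem.Str.strip ((PySem.Dict.mk w).getD "word" "")
  PySem.Str.endswith s "." || PySem.Str.endswith s "!" || PySem.Str.endswith s "?"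

-- words[p] then the sentence-end test; both programs only index in range (the none branch is unreachable there)
def pvFlagAt (words : List (List (String × String))) (p : Int) : Bool :=
  match PySem.List.pyGet? words p with
  | some w => pvSentEnd w
  | none => false

-- ===== PORT A =====
-- for j in range(end, max(i+target//2, i+1), -1): if <sentence end at j-1>: best = j; break
def pvScanA (words : List (List (String × String))) (d : Int) (js : List Int) : Int :=
  match js with
  | [] => d
  | j :: rest => if pvFlagAt words (j - 1) then j else pvScanA words d rest

-- the while loop accumulating the blocks; fuel words.length+1 suffices whenever target ≥ 1 (Pre_)
def pvLoopA (words : List (List (String × String))) (target : Int) (fuel : Nat) (i : Int)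
    (acc : List (List (List (String × String)))) : List (List (List (String × String))) :=
  match fuel with
  | 0 => acc
  | fuel' + 1 =>
    if i < (words.length : Int) then
      let e := min (i + target) (words.length : Int)
      let lo := max (i + PySem.Int.floordiv target 2) (i + 1)
      let best := pvScanA words e (PySem.List.pyRange e lo (-1))
      pvLoopA words target fuel' best (acc ++ [PySem.List.slice words (some i) (some best)])
    else acc

-- if len(blocks)>1 and len(blocks[-1])<8: blocks[-2].extend(blocks[-1]); blocks.pop()
def pvMergeTailA (blocks : List (List (List (String × String)))) : List (List (List (String × String))) :=
  match blocks.reverse with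
  | last :: prev :: rest => if last.length < 8 then ((prev ++ last) :: rest).reverse else blocks
  | _ => blocks

def lab_split_into_blocks_py (words : List (List (String × String))) (target : Int) : List (List (List (String × String))) :=
  pvMergeTailA (pvLoopA words target (words.length + 1) 0 [])

-- ===== PORT B =====
-- ends[k]+1 if k >= 0 and ends[k] >= lo else e, with k = bisect_right(ends, e-1) - 1
def pvBestB (P : List Int) (lo e : Int) : Int :=
  let k : Int := (PySem.List.bisectRight P (e - 1) : Int) - 1
  if 0 ≤ k ∧ lo ≤ PySem.List.pyGetD P k 0 then PySem.List.pyGetD P k 0 + 1 else e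

-- the cuts appended after the initial 0: while cuts[-1] < n: cuts.append(<next cut>)
def pvCutsB (words : List (List (String × String))) (target : Int) (P : List Int) (fuel : Nat)
    (i : Int) : List Int :=
  match fuel with
  | 0 => []
  | fuel' + 1 =>
    if i < (words.length : Int) then
      let e := min (i + target) (words.length : Int)
      let lo := max (i + PySem.Int.floordiv target 2) (i + 1)
      let c := pvBestB P lo e
      c :: pvCutsB words target P fuel' c
    else []

-- blocks[-2:] = [blocks[-2] + blocks[-1]]  (when len(blocks)>1 and len(blocks[-1])<8)
def pvMergeB (blocks : List (List (List (String × String)))) : List (List (List (String × String))) :=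
  if 1 < blocks.length ∧ (blocks.getLastD []).length < 8 then
    blocks.dropLast.dropLast ++ [blocks.dropLast.getLastD [] ++ blocks.getLastD []]
  else blocks

def lab_split_into_blocks_py_alt (words : List (List (String × String))) (target : Int) : List (List (List (String × String))) :=
  let P := (PySem.List.pyRange 0 (words.length : Int) 1).filter (fun p => pvFlagAt words p)
  let cuts := pvCutsB words target P (words.length + 1) 0
  pvMergeB (((0 :: cuts).zip cuts).map (fun ab => PySem.List.slice words (some ab.1) (some ab.2)))

-- ===== PRECONDITION & SPEC =====
-- Pre_ excludes target ≤ 0 with nonempty words: there A's while loop never advances i and Python diverges (B's likewise).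
def Pre_lab_split_into_blocks_py (words : List (List (String × String))) (target : Int) : Prop :=
  words.isEmpty = true ∨ 1 ≤ target
instance (words : List (List (String × String))) (target : Int) : Decidable (Pre_lab_split_into_blocks_py words target) := by unfold Pre_lab_split_into_blocks_py; infer_instance

def pvWitness_lab_split_into_blocks_py : (List (List (String × String))) × Int :=
  ([[("word", "Hi.")], [("word", "there")]], 2)

def Spec_lab_split_into_blocks_py (words : List (List (String × String))) (target : Int) (out : List (List (List (String × String)))) : Prop := out = lab_split_into_blocks_py_alt words target
instance (words : List (List (String × String))) (target : Int) (out : List (List (List (String × String)))) : Decidable (Spec_lab_split_into_blocks_py words target out) := by unfold Spec_lab_split_into_blocks_py; infer_instance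

-- ===== CLAIM (what is proved, stated in full; the proofs are below) =====
def Claim_equal_lab_split_into_blocks_py : Prop := ∀ (words : List (List (String × String))) (target : Int), Dom_lab_split_into_blocks_py words target → Pre_lab_split_into_blocks_py words target → Spec_lab_split_into_blocks_py words target (lab_split_into_blocks_py words target)

-- ===== LEMMAS AND PROOFS =====

-- reference form of the inner search: greatest flagged position in [lo, e), scanning downwards
def pvLastFlag (words : List (List (String × String))) (lo e : Int) : Option Int :=
  if h : e ≤ lo then none
  else if pvFlagAt words (e - 1) then some (e - 1) else pvLastFlag words lo (e - 1)
termination_by (e - lo).toNat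
decreasing_by omega

theorem pvScan_eq_lastFlag (words : List (List (String × String))) (lo e d : Int) :
    pvScanA words d (PySem.List.pyRange e lo (-1)) = ((pvLastFlag words lo e).map (· + 1)).getD d := by
  by_cases h : e ≤ lo
  · rw [PySem.List.pyRange_neg_one_eq_nil h, pvLastFlag]
    simp [h, pvScanA]
  · rw [PySem.List.pyRange_neg_one_cons (by omega), pvLastFlag]
    simp only [pvScanA, dif_neg h]
    by_cases hf : pvFlagAt words (e - 1) = true
    · simp [hf]
    · simp only [hf, Bool.false_eq_true, if_false]
      exact pvScan_eq_lastFlag words lo (e - 1) d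
termination_by (e - lo).toNat
decreasing_by omega

theorem lastFlag_none_iff (words : List (List (String × String))) (lo e : Int) :
    pvLastFlag words lo e = none ↔ ∀ p, lo ≤ p → p < e → pvFlagAt words p = false := by
  rw [pvLastFlag]
  by_cases h : e ≤ lo
  · simp [h]; intro p h1 h2; omega
  · by_cases hf : pvFlagAt words (e - 1) = true
    · rw [dif_neg h, if_pos hf]
      constructor
      · intro hx; exact absurd hx (by simp)
      · intro hall; have := hall (e - 1) (by omega) (by omega); simp [hf] at this
    · simp only [dif_neg h, hf, Bool.false_eq_true, if_false]
      rw [lastFlag_none_iff words lo (e - 1)]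
      constructor
      · intro hall p h1 h2
        by_cases hp : p = e - 1
        · subst hp; simpa using hf
        · exact hall p h1 (by omega)
      · exact fun hall p h1 h2 => hall p h1 (by omega)
termination_by (e - lo).toNat
decreasing_by omega

theorem lastFlag_some_spec (words : List (List (String × String))) (lo e p : Int)
    (h : pvLastFlag words lo e = some p) :
    lo ≤ p ∧ p < e ∧ pvFlagAt words p = true ∧ ∀ q, p < q → q < e → pvFlagAt words q = false := by
  rw [pvLastFlag] at h
  by_cases hle : e ≤ lo
  · simp [hle] at h
  · by_cases hf : pvFlagAt words (e - 1) = true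
    · simp [hle, hf] at h
      subst h
      exact ⟨by omega, by omega, hf, fun q h1 h2 => by omega⟩
    · simp only [dif_neg hle, hf, Bool.false_eq_true, if_false] at h
      obtain ⟨h1, h2, h3, h4⟩ := lastFlag_some_spec words lo (e - 1) p h
      refine ⟨h1, by omega, h3, fun q hq1 hq2 => ?_⟩
      by_cases hq : q = e - 1
      · subst hq; simpa using hf
      · exact h4 q hq1 (by omega)
termination_by (e - lo).toNat
decreasing_by omega

-- membership in the precomputed list of sentence-end positions
theorem mem_P_iff (words : List (List (String × String))) (p : Int) :
    p ∈ (PySem.List.pyRange 0 (words.length : Int) 1).filter (fun p => pvFlagAt words p) ↔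
    0 ≤ p ∧ p < (words.length : Int) ∧ pvFlagAt words p = true := by
  simp [List.mem_filter, PySem.List.mem_pyRange_one, and_assoc]

theorem sorted_P (words : List (List (String × String))) :
    ((PySem.List.pyRange 0 (words.length : Int) 1).filter (fun p => pvFlagAt words p)).Pairwise (· ≤ ·) :=
  ((PySem.List.pairwise_lt_pyRange_one 0 (words.length : Int)).filter _).imp le_of_lt

-- the bisect-based block end equals the downward-scan block end
theorem bestB_eq_lastFlag (words : List (List (String × String))) (lo e : Int)
    (hlo : 1 ≤ lo) (he : e ≤ (words.length : Int)) :
    pvBestB ((PySem.List.pyRange 0 (words.length : Int) 1).filter (fun p => pvFlagAt words p)) lo e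
      = ((pvLastFlag words lo e).map (· + 1)).getD e := by
  set P := (PySem.List.pyRange 0 (words.length : Int) 1).filter (fun p => pvFlagAt words p) with hP
  obtain ⟨hc_len, hc_le, hc_gt⟩ := PySem.List.bisectRight_spec P (e - 1) (sorted_P words)
  set c := PySem.List.bisectRight P (e - 1) with hc
  have hidx : ∀ q, q ∈ P → lo ≤ q → q ≤ e - 1 → ∃ j : Nat, ∃ hj : j < P.length, j < c ∧ P[j] = q := by
    intro q hq hq1 hq2
    obtain ⟨j, hj, hPj⟩ := List.mem_iff_getElem.mp hq
    refine ⟨j, hj, ?_, hPj⟩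
    by_contra hge
    have := hc_gt j hj (by omega)
    omega
  have hmono : ∀ (a b : Nat) (_ : a < P.length) (_ : b < P.length), a < b → P[a] ≤ P[b] :=
    List.pairwise_iff_getElem.mp (sorted_P words)
  simp only [pvBestB]
  rw [← hc]
  cases hLF : pvLastFlag words lo e with
  | none =>
    have hall := (lastFlag_none_iff words lo e).mp hLF
    rw [if_neg]
    · simp
    rintro ⟨hk0, hkval⟩
    have hcpos : 0 < c := by omega
    have hlt : c - 1 < P.length := by omega
    have hget : PySem.List.pyGetD P ((c : Int) - 1) 0 = P[c - 1] := by
      rw [PySem.List.pyGetD_eq_getElem P (i := (c : Int) - 1) 0 (by omega) (by omega)]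
      congr 1
      omega
    rw [hget] at hkval
    have hmem : P[c - 1] ∈ P := List.getElem_mem hlt
    obtain ⟨h0, hn, hflag⟩ := (mem_P_iff words P[c - 1]).mp hmem
    have hle' : P[c - 1] ≤ e - 1 := hc_le (c - 1) hlt (by omega)
    have := hall P[c - 1] hkval (by omega)
    simp [hflag] at this
  | some p =>
    obtain ⟨h1, h2, h3, h4⟩ := lastFlag_some_spec words lo e p hLF
    have hpmem : p ∈ P := (mem_P_iff words p).mpr ⟨by omega, by omega, h3⟩
    obtain ⟨j, hj, hjc, hPj⟩ := hidx p hpmem h1 (by omega)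
    have hcpos : 0 < c := by omega
    have hlt : c - 1 < P.length := by omega
    have hget : PySem.List.pyGetD P ((c : Int) - 1) 0 = P[c - 1] := by
      rw [PySem.List.pyGetD_eq_getElem P (i := (c : Int) - 1) 0 (by omega) (by omega)]
      congr 1
      omega
    have hub : p ≤ P[c - 1] := by
      rcases Nat.lt_or_ge j (c - 1) with hlt' | hge
      · have := hmono j (c - 1) hj hlt hlt'
        omega
      · have hje : j = c - 1 := by omega
        subst hje
        omega
    have hle' : P[c - 1] ≤ e - 1 := hc_le (c - 1) hlt (by omega)
    obtain ⟨h0', hn', hflag'⟩ := (mem_P_iff words P[c - 1]).mp (List.getElem_mem hlt)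
    have heq : P[c - 1] = p := by
      by_contra hne
      have := h4 P[c - 1] (by omega) (by omega)
      simp [hflag'] at this
    rw [if_pos]
    · rw [hget, heq]; simp
    · rw [hget, heq]; exact ⟨by omega, h1⟩

-- A's accumulating loop produces exactly the slices between consecutive cuts of B
theorem loopA_eq_cuts (words : List (List (String × String))) (target : Int) (ht : 1 ≤ target) :
    ∀ (fuel : Nat) (i : Int) (acc : List (List (List (String × String)))), 0 ≤ i →
      pvLoopA words target fuel i acc
        = acc ++ ((i :: pvCutsB words target ((PySem.List.pyRange 0 (words.length : Int) 1).filter (fun p => pvFlagAt words p)) fuel i).zip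
            (pvCutsB words target ((PySem.List.pyRange 0 (words.length : Int) 1).filter (fun p => pvFlagAt words p)) fuel i)).map
            (fun ab => PySem.List.slice words (some ab.1) (some ab.2)) := by
  intro fuel
  induction fuel with
  | zero => intro i acc _; simp [pvLoopA, pvCutsB]
  | succ fuel' ih =>
    intro i acc hi
    unfold pvLoopA pvCutsB
    by_cases hlt : i < (words.length : Int)
    · simp only [hlt, if_pos]
      have hbest : pvScanA words (min (i + target) (words.length : Int))
            (PySem.List.pyRange (min (i + target) (words.length : Int))
              (max (i + PySem.Int.floordiv target 2) (i + 1)) (-1))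
          = pvBestB ((PySem.List.pyRange 0 (words.length : Int) 1).filter (fun p => pvFlagAt words p))
              (max (i + PySem.Int.floordiv target 2) (i + 1)) (min (i + target) (words.length : Int)) := by
        rw [pvScan_eq_lastFlag, bestB_eq_lastFlag words _ _ (by omega) (by omega)]
      rw [hbest]
      have hb0 : 0 ≤ pvBestB ((PySem.List.pyRange 0 (words.length : Int) 1).filter (fun p => pvFlagAt words p))
          (max (i + PySem.Int.floordiv target 2) (i + 1)) (min (i + target) (words.length : Int)) := by
        cases hLF : pvLastFlag words (max (i + PySem.Int.floordiv target 2) (i + 1)) (min (i + target) (words.length : Int)) with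
        | none =>
          rw [bestB_eq_lastFlag words _ _ (by omega) (by omega), hLF]
          simp; omega
        | some p =>
          rw [bestB_eq_lastFlag words _ _ (by omega) (by omega), hLF]
          obtain ⟨h1, _, _, _⟩ := lastFlag_some_spec words _ _ p hLF
          simp; omega
      rw [ih _ _ hb0]
      simp [List.zip_cons_cons, List.append_assoc]
    · simp [hlt]

-- the two tail merges agree
theorem mergeA_eq_mergeB (blocks : List (List (List (String × String)))) :
    pvMergeTailA blocks = pvMergeB blocks := by
  rcases h : blocks.reverse with _ | ⟨last, rest1⟩
  · have : blocks = [] := by simpa using congrArg List.reverse h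
    subst this; rfl
  · rcases rest1 with _ | ⟨prev, rest⟩
    · have : blocks = [last] := by simpa using congrArg List.reverse h
      subst this
      simp [pvMergeTailA, pvMergeB]
    · have hb : blocks = rest.reverse ++ [prev, last] := by
        have := congrArg List.reverse h
        simpa using this
      subst hb
      by_cases hl : last.length < 8
      · simp [pvMergeTailA, pvMergeB, hl]
      · simp [pvMergeTailA, pvMergeB, hl]

-- ===== VERDICT (by name: the statement is the Claim_ definition above) =====
theorem lab_split_into_blocks_py_spec : Claim_equal_lab_split_into_blocks_py := by
  intro words target _ hpre
  unfold Spec_lab_split_into_blocks_py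
  unfold lab_split_into_blocks_py lab_split_into_blocks_py_alt
  rcases hpre with hnil | ht
  · rw [List.isEmpty_iff] at hnil; subst hnil; rfl
  · rw [loopA_eq_cuts words target ht (words.length + 1) 0 [] le_rfl, mergeA_eq_mergeB]
    simp
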